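-- pv_equiv track=rewrite | github.com/pypi-data/pypi-mirror-147 | packages/luckypost/luckypost-0.9.3.tar.gz/luckypost-0.9.3/src/luckypost/luckypost.py | get_child_count_per_branch
-- ===== SOURCE A (Python) =====
-- from typing import (
--     BinaryIO,
--     Tuple,
--     Iterable,
--     List,
--     Optional,
--     Callable,
--     Iterator,
--     Union,
--     Any,
--     Dict)
--
-- def get_child_count_per_branch(
--         leaf_count: int,
--         branch_capacity: int) -> Iterable[Tuple[int, int, int]]:
--     # zero or one leaves means no branches
--     if leaf_count <= 1:
--         return []
--     # tree height is number of levels in the tree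
--     tree_height = get_tree_height(leaf_count, branch_capacity)
--     # start at the uppermost level of branches (one below leaves)
--     tree_level = tree_height - 2
--     # loop until no more branches
--     child_count = leaf_count
--     while True:
--         # get number of branches at this level
--         branch_count, remainder = divmod(child_count, branch_capacity)
--         if remainder:
--             branch_count += 1
--         # iterate over each branch on this level
--         for position in range(branch_count):
--             last = position == branch_count - 1
--             if last:
--                 yield tree_level, position, remainder or branch_capacity
--             else:
--                 yield tree_level, position, branch_capacity
--         # moving on to the next level
--         tree_level -= 1
--         # end of the tree? we're done
--         if tree_level < 0:
--             break
--         # all the branches at this layer become children for the next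
--         child_count = branch_count
--
-- def get_tree_height(leaf_count: int, branch_capacity: int) -> int:
--     """Count number of branches in a tree."""
--     return get_branch_count_and_tree_height(
--         leaf_count, branch_capacity)[1]
--
-- def get_branch_count_and_tree_height(
--         leaf_count: int,
--         branch_capacity: int) -> Tuple[int, int]:
--     """Count number of branches in a tree and the tree's height."""
--     total_branch_count = 0
--     child_count = leaf_count
--     # one or zero leaves means there is no need for any branches
--     if child_count == 0:  # empty content (zero length)
--         return 0, 0  # 0 branches, 0 height
--     if child_count == 1:
--         return 0, 1  # 0 branches, 1 height
--     # track height of tree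
--     tree_height = 1
--     # each iteration handles each layer of the tree
--     while True:
--         tree_height += 1
--         # count number of children to put into this branch
--         branch_count, remainder = divmod(child_count, branch_capacity)
--         # if there's still more children we'll need another branch on
--         # this level
--         if remainder:
--             branch_count += 1
--         # add number of branches at this level to the total
--         total_branch_count += branch_count
--         # only one branch at this level? that's the root node! done!
--         if branch_count == 1:
--             break
--         # all the branches at this layer turn into children for the next
--         child_count = branch_count
--     return total_branch_count, tree_height
-- ===== SOURCE B (Python) =====
-- def get_child_count_per_branch(leaf_count, branch_capacity):
--     # zero or one leaves means no branches (stay a generator: yield nothing)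
--     if leaf_count <= 1:
--         return
--     # single bottom-up pass: collect (branch_count, remainder) per level,
--     # replacing the separate tree-height precomputation
--     levels = []
--     child_count = leaf_count
--     while True:
--         branch_count, remainder = divmod(child_count, branch_capacity)
--         if remainder:
--             branch_count += 1
--         levels.append((branch_count, remainder))
--         if branch_count == 1:
--             break
--         child_count = branch_count
--     # emit rows; first collected layer is the highest level number
--     level = len(levels) - 1
--     for branch_count, remainder in levels:
--         for position in range(branch_count):
--             if position == branch_count - 1:
--                 yield level, position, remainder or branch_capacity
--             else:
--                 yield level, position, branch_capacity
--         level -= 1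
-- ===== Notes on version B (the rewrite author's own statement) =====
-- stated objective: simpler
-- what changed: B drops the separate get_tree_height/get_branch_count_and_tree_height precomputation pass: one bottom-up loop records a (branch_count, remainder) table per level and a second loop renders the rows from it, so the tree is walked once instead of twice.
-- outside the precondition, e.g. on get_child_count_per_branch(2, 0): A raises ZeroDivisionError, B raises ZeroDivisionError; on get_child_count_per_branch(5, -2): A returns [(0, 0, -2)], B returns [(0, 0, -2)]
import Mathlib
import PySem

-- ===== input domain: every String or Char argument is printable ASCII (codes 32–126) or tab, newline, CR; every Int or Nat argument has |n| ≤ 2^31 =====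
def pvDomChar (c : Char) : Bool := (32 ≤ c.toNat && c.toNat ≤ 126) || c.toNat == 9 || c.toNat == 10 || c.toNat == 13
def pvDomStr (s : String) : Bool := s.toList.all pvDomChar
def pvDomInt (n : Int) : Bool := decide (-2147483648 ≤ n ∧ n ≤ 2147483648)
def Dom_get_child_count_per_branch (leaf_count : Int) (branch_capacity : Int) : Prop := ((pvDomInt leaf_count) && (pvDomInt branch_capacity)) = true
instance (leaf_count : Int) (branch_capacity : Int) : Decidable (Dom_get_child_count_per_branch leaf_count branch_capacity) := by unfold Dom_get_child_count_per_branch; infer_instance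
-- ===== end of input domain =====

-- B replaces A's separate tree-height precomputation by one bottom-up pass that
-- records (branch_count, remainder) per level and then renders the rows (simpler).
-- Both Pythons are generators; the equivalence is about the yielded sequence.


-- ===== PORT A =====
-- A's inner while-loop of get_branch_count_and_tree_height; fuel only makes the
-- loop total (inside Pre_ at most ~32 iterations are ever taken, fuel 100 suffices).
def pvA_heightLoop (branch_capacity : Int) : Nat → Int → Int → Int → Int × Int
  | 0, total, _, tree_height => (total, tree_height)
  | fuel + 1, total, child_count, tree_height =>
    let tree_height := tree_height + 1
    match PySem.Int.divmod? child_count branch_capacity with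
    | none => (total, tree_height)  -- ZeroDivisionError; unreachable inside Pre_
    | some (bc, r) =>
      let branch_count := if r = 0 then bc else bc + 1
      let total := total + branch_count
      if branch_count = 1 then (total, tree_height)
      else pvA_heightLoop branch_capacity fuel total branch_count tree_height

def get_branch_count_and_tree_height (leaf_count : Int) (branch_capacity : Int) : Int × Int :=
  if leaf_count = 0 then (0, 0)
  else if leaf_count = 1 then (0, 1)
  else pvA_heightLoop branch_capacity 100 0 leaf_count 1

def get_tree_height (leaf_count : Int) (branch_capacity : Int) : Int :=
  (get_branch_count_and_tree_height leaf_count branch_capacity).2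

-- A's main while-loop; one row per level, tree_level counts down to 0.
def pvA_mainLoop (branch_capacity : Int) : Nat → Int → Int → List (Int × Int × Int)
  | 0, _, _ => []
  | fuel + 1, tree_level, child_count =>
    match PySem.Int.divmod? child_count branch_capacity with
    | none => []  -- ZeroDivisionError; unreachable inside Pre_
    | some (bc, r) =>
      let branch_count := if r = 0 then bc else bc + 1
      let row := (PySem.List.pyRange 0 branch_count 1).map (fun position =>
        if position = branch_count - 1 then
          (tree_level, position, if r = 0 then branch_capacity else r)
        else (tree_level, position, branch_capacity))
      if tree_level - 1 < 0 then row
      else row ++ pvA_mainLoop branch_capacity fuel (tree_level - 1) branch_count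

def get_child_count_per_branch (leaf_count : Int) (branch_capacity : Int) : List (Int × Int × Int) :=
  if leaf_count ≤ 1 then []
  else
    let tree_height := get_tree_height leaf_count branch_capacity
    pvA_mainLoop branch_capacity 100 (tree_height - 2) leaf_count

-- ===== PORT B =====
-- B's first loop: the (branch_count, remainder) table, bottom level first.
def pvB_levels (branch_capacity : Int) : Nat → Int → List (Int × Int)
  | 0, _ => []
  | fuel + 1, child_count =>
    match PySem.Int.divmod? child_count branch_capacity with
    | none => []  -- ZeroDivisionError; unreachable inside Pre_
    | some (bc, r) =>
      let branch_count := if r = 0 then bc else bc + 1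
      if branch_count = 1 then [(branch_count, r)]
      else (branch_count, r) :: pvB_levels branch_capacity fuel branch_count

-- B's second loop: render each recorded level, level number counting down.
def pvB_render (branch_capacity : Int) : Int → List (Int × Int) → List (Int × Int × Int)
  | _, [] => []
  | level, (branch_count, remainder) :: rest =>
    ((PySem.List.pyRange 0 branch_count 1).map (fun position =>
      if position = branch_count - 1 then
        (level, position, if remainder = 0 then branch_capacity else remainder)
      else (level, position, branch_capacity)))
    ++ pvB_render branch_capacity (level - 1) rest

def get_child_count_per_branch_alt (leaf_count : Int) (branch_capacity : Int) : List (Int × Int × Int) :=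
  if leaf_count ≤ 1 then []
  else
    let levels := pvB_levels branch_capacity 100 leaf_count
    pvB_render branch_capacity ((levels.length : Int) - 1) levels

-- ===== PRECONDITION & SPEC =====
-- Pre_ excludes branch_capacity ≤ 1 with leaf_count ≥ 2: A raises ZeroDivisionError
-- (capacity 0) or loops forever (capacity 1 and, input-dependently, negative
-- capacities, e.g. (2, -3)); because termination there is input-dependent and not
-- closed-form, the whole region is excluded even though on the negative-capacity
-- inputs where A does terminate B happens to return the same value (see cites).
def Pre_get_child_count_per_branch (leaf_count : Int) (branch_capacity : Int) : Prop :=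
  leaf_count ≤ 1 ∨ 2 ≤ branch_capacity
instance (leaf_count : Int) (branch_capacity : Int) : Decidable (Pre_get_child_count_per_branch leaf_count branch_capacity) := by unfold Pre_get_child_count_per_branch; infer_instance
def pvWitness_get_child_count_per_branch : Int × Int := (10, 3)

def Spec_get_child_count_per_branch (leaf_count : Int) (branch_capacity : Int) (out : List (Int × Int × Int)) : Prop := out = get_child_count_per_branch_alt leaf_count branch_capacity
instance (leaf_count : Int) (branch_capacity : Int) (out : List (Int × Int × Int)) : Decidable (Spec_get_child_count_per_branch leaf_count branch_capacity out) := by unfold Spec_get_child_count_per_branch; infer_instance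

-- ===== CLAIM (what is proved, stated in full; the proofs are below) =====
def Claim_equal_get_child_count_per_branch : Prop := ∀ (leaf_count : Int) (branch_capacity : Int), Dom_get_child_count_per_branch leaf_count branch_capacity → Pre_get_child_count_per_branch leaf_count branch_capacity → Spec_get_child_count_per_branch leaf_count branch_capacity (get_child_count_per_branch leaf_count branch_capacity)

-- ===== LEMMAS AND PROOFS =====

-- A's height loop measures exactly the length of B's level table (same fuel, same steps).
theorem pvA_height_eq_levels (cap : Int) (hc : cap ≠ 0) :
    ∀ (fuel : Nat) (total child h : Int),
      (pvA_heightLoop cap fuel total child h).2 = h + ((pvB_levels cap fuel child).length : Int) := by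
  intro fuel
  induction fuel with
  | zero => intro total child h; simp [pvA_heightLoop, pvB_levels]
  | succ n ih =>
    intro total child h
    simp only [pvA_heightLoop, pvB_levels]
    rcases hdm : PySem.Int.divmod? child cap with _ | ⟨bc, r⟩
    · simp [PySem.Int.divmod?, hc] at hdm
    · simp only
      by_cases h1 : (if r = 0 then bc else bc + 1) = 1
      · simp [h1]
      · simp only [h1, if_false]
        rw [ih]
        simp only [List.length_cons]
        push_cast; ring

-- A's main loop, started at level = |levels| - 1, renders B's level table.
theorem pvA_main_eq_render (cap : Int) (hc : cap ≠ 0) :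
    ∀ (fuel : Nat) (child : Int),
      pvA_mainLoop cap fuel (((pvB_levels cap fuel child).length : Int) - 1) child
        = pvB_render cap (((pvB_levels cap fuel child).length : Int) - 1) (pvB_levels cap fuel child) := by
  intro fuel
  induction fuel with
  | zero => intro child; simp [pvA_mainLoop, pvB_levels, pvB_render]
  | succ n ih =>
    intro child
    simp only [pvB_levels]
    rcases hdm : PySem.Int.divmod? child cap with _ | ⟨bc, r⟩
    · simp [PySem.Int.divmod?, hc] at hdm
    · simp only
      by_cases h1 : (if r = 0 then bc else bc + 1) = 1
      · simp [pvA_mainLoop, pvB_render, hdm, h1]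
      · simp only [h1, if_false]
        by_cases ht : pvB_levels cap n (if r = 0 then bc else bc + 1) = []
        · simp [pvA_mainLoop, pvB_render, hdm, ht]
        · have hlen : 1 ≤ ((pvB_levels cap n (if r = 0 then bc else bc + 1)).length : Int) := by
            rcases List.exists_cons_of_ne_nil ht with ⟨a, t, he⟩
            simp [he]
          simp only [pvA_mainLoop, hdm, pvB_render, List.length_cons]
          rw [if_neg (by push_cast; omega)]
          have harg : (((pvB_levels cap n (if r = 0 then bc else bc + 1)).length + 1 : Nat) : Int) - 1 - 1
              = ((pvB_levels cap n (if r = 0 then bc else bc + 1)).length : Int) - 1 := by push_cast; ring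
          rw [harg, ih]

-- ===== VERDICT (by name: the statement is the Claim_ definition above) =====
theorem get_child_count_per_branch_spec : Claim_equal_get_child_count_per_branch := by
  intro leaf cap hdom hpre
  unfold Spec_get_child_count_per_branch get_child_count_per_branch get_child_count_per_branch_alt
  by_cases hl : leaf ≤ 1
  · simp [hl]
  · have hcap : 2 ≤ cap := hpre.resolve_left hl
    have hc : cap ≠ 0 := by omega
    rw [if_neg hl, if_neg hl]
    simp only [get_tree_height, get_branch_count_and_tree_height,
      if_neg (by omega : ¬ leaf = 0), if_neg (by omega : ¬ leaf = 1)]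
    rw [pvA_height_eq_levels cap hc 100 0 leaf 1]
    have h2 : 1 + ((pvB_levels cap 100 leaf).length : Int) - 2
        = ((pvB_levels cap 100 leaf).length : Int) - 1 := by ring
    rw [h2, pvA_main_eq_render cap hc 100 leaf]
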